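-- pv_equiv track=rewrite | github.com/summer-vacation/AlgoExec | tencent/findNumbers.py | isOdd
-- ===== SOURCE A (Python) =====
-- def isOdd(num):
--     count = 1
--     while num > 0:
--         num = num // 10
--         if num > 0:
--             count += 1
--         else:
--             break
--     return True if count % 2 == 0 else False
-- ===== SOURCE B (Python) =====
-- def isOdd(num):
--     count = len(str(num)) if num > 0 else 1
--     return count % 2 == 0
-- ===== Notes on version B (the rewrite author's own statement) =====
-- stated objective: idiomatic
-- what changed: Replaces the repeated floor-division counting loop with a single digit count via len(str(num)) (count 1 for num <= 0, as in A), then tests parity.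
import Mathlib
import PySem

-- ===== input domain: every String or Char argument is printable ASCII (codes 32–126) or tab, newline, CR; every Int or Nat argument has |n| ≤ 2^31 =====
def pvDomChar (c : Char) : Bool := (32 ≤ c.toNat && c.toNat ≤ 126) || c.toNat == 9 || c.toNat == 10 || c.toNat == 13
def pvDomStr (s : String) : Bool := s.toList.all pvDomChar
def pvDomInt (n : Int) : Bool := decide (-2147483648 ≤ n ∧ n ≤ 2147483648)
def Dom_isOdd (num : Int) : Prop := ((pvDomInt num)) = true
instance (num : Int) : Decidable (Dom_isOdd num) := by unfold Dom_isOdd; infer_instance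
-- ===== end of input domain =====

-- B replaces A's repeated //10 counting loop with one digit count via len(str(num)) (idiomatic).

-- ===== PORT A =====
-- the while loop: num is divided by 10, count incremented while the quotient stays positive
def isOddLoop (num count : Int) : Int :=
  if num > 0 then
    let num' := PySem.Int.floordiv num 10
    if num' > 0 then isOddLoop num' (count + 1) else count
  else count
termination_by num.toNat
decreasing_by
  simp only [PySem.Int.floordiv, Int.fdiv_eq_ediv] at *
  omega

def isOdd (num : Int) : Bool :=
  if PySem.Int.mod (isOddLoop num 1) 2 == 0 then true else false

-- ===== PORT B =====
def isOdd_alt (num : Int) : Bool :=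
  let count : Int := if num > 0 then PySem.Str.len (PySem.Int.toStr num) else 1
  PySem.Int.mod count 2 == 0

-- ===== PRECONDITION & SPEC =====
def Spec_isOdd (num : Int) (out : Bool) : Prop := out = isOdd_alt num
instance (num : Int) (out : Bool) : Decidable (Spec_isOdd num out) := by unfold Spec_isOdd; infer_instance

-- ===== CLAIM (what is proved, stated in full; the proofs are below) =====
def Claim_equal_isOdd : Prop := ∀ (num : Int), Dom_isOdd num → Spec_isOdd num (isOdd num)

-- ===== LEMMAS AND PROOFS =====

-- A's loop on a positive n adds the number of decimal digits minus one plus one: count + log₁₀ n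
theorem isOddLoop_eq_log (n : Nat) (c : Int) (hn : 0 < n) :
    isOddLoop (n : Int) c = c + Nat.log 10 n := by
  induction n using Nat.strong_induction_on generalizing c with
  | _ n ih =>
    rw [isOddLoop]
    have hfd : PySem.Int.floordiv (n : Int) 10 = ((n / 10 : Nat) : Int) := by
      simp [PySem.Int.floordiv, Int.fdiv_eq_ediv]
    by_cases h10 : 10 ≤ n
    · have hq : 0 < n / 10 := Nat.div_pos h10 (by norm_num)
      have hlt : n / 10 < n := Nat.div_lt_self hn (by norm_num)
      rw [if_pos (by exact_mod_cast hn), hfd, if_pos (by exact_mod_cast hq),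
        ih (n / 10) hlt (c + 1) hq]
      have hlog : Nat.log 10 (n / 10) = Nat.log 10 n - 1 := Nat.log_div_base 10 n
      have hpos : 0 < Nat.log 10 n := Nat.log_pos (by norm_num) h10
      omega
    · have hq : n / 10 = 0 := Nat.div_eq_of_lt (by omega)
      rw [if_pos (by exact_mod_cast hn), hfd, hq]
      simp [Nat.log_of_lt (by omega : n < 10)]

-- exact length of Nat.toDigits (fuel-indexed core version)
theorem toDigitsCore_length_eq (fuel : Nat) :
    ∀ (n : Nat) (l : List Char), n < fuel →
      (Nat.toDigitsCore 10 fuel n l).length = Nat.log 10 n + 1 + l.length := by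
  induction fuel with
  | zero => intro n l h; omega
  | succ fuel ih =>
    intro n l _
    simp only [Nat.toDigitsCore]
    by_cases hq : n / 10 = 0
    · rw [if_pos hq]
      have : n < 10 := by omega
      simp [Nat.log_of_lt this]; omega
    · rw [if_neg hq]
      have h10 : 10 ≤ n := by
        by_contra h
        exact hq (Nat.div_eq_of_lt (by omega))
      have hlt : n / 10 < fuel := by
        have := Nat.div_lt_self (by omega : 0 < n) (by norm_num : 1 < 10)
        omega
      rw [ih (n / 10) _ hlt]
      have hlog : Nat.log 10 (n / 10) = Nat.log 10 n - 1 := Nat.log_div_base 10 n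
      have hpos : 0 < Nat.log 10 n := Nat.log_pos (by norm_num) h10
      simp only [List.length_cons]
      omega

theorem toDigits_length_eq (n : Nat) :
    (Nat.toDigits 10 n).length = Nat.log 10 n + 1 := by
  have := toDigitsCore_length_eq (n + 1) n [] (by omega)
  simpa [Nat.toDigits] using this

-- B's digit count for positive n: len(str(n)) = log₁₀ n + 1
theorem strlen_eq (n : Nat) (hn : 0 < n) :
    PySem.Str.len (PySem.Int.toStr (n : Int)) = ((Nat.log 10 n : Nat) : Int) + 1 := by
  simp only [PySem.Str.len, PySem.Int.toList_toStr, PySem.Int.toChars]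
  rw [if_neg (by omega)]
  simp [toDigits_length_eq]

-- ===== VERDICT (by name: the statement is the Claim_ definition above) =====
theorem isOdd_spec : Claim_equal_isOdd := by
  intro num _
  unfold Spec_isOdd isOdd isOdd_alt
  by_cases h : num > 0
  · have hn : 0 < num.toNat := by omega
    have hcast : ((num.toNat : Nat) : Int) = num := by omega
    have hA : isOddLoop num 1 = 1 + Nat.log 10 num.toNat := by
      rw [← hcast]; exact isOddLoop_eq_log num.toNat 1 hn
    have hB : PySem.Str.len (PySem.Int.toStr num) = ((Nat.log 10 num.toNat : Nat) : Int) + 1 := by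
      rw [← hcast]; exact strlen_eq num.toNat hn
    rw [hA, if_pos h, hB]
    have : (1 : Int) + Nat.log 10 num.toNat = ((Nat.log 10 num.toNat : Nat) : Int) + 1 := by ring
    rw [this]
    cases hb : (PySem.Int.mod (((Nat.log 10 num.toNat : Nat) : Int) + 1) 2 == 0) <;> simp
  · have hA : isOddLoop num 1 = 1 := by rw [isOddLoop, if_neg h]
    rw [hA, if_neg h]
    decide
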